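-- pv_equiv track=rewrite | github.com/airberlin1/schiffe_versenken | buttons.py | _get_field_coords_end_b
-- ===== SOURCE A (Python) =====
-- def _get_field_coords_end_b(end_button_number):
--     """
--     returns a list with an end button's coordiantes.
--     This list than holds all the coordinates on which the button can be clicked
--     :param end_button_number: int; end button's number
--     :return: list[list[int, int], list[int, int], ...]; coordiantes the button is on
--     """
--     if end_button_number == 0:  # 0 is the end button while orientation == "width"
--         xcoord_count = 7  # sets the width of the button
--         start_coord = [11, 11]  # sets the top left field coord of the button
--
--     elif end_button_number == 1:  # 1 is the end button while orientation == "height"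
--         xcoord_count = 8  # sets the width of the button
--         start_coord = [11, 11]  # sets the top left field coord of the button
--
--     elif end_button_number == 2:  # 2 is the settings button while orientation == "width"
--         xcoord_count = 7  # sets the width of the button
--         start_coord = [3, 11]  # sets the top left field coord of the button
--
--     else:  # 3 is the settings button while orientation == "height"
--         xcoord_count = 8  # sets the width of the button
--         start_coord = [11, 8]  # sets the top left field coord of the button
--
--     field_coords = []  # creates a list that is going to hold the field coords
--     next_coord = start_coord[:]
--     for j in range(2 * xcoord_count):
--         field_coords.append(next_coord[:])  # adds the coordinate to the list of coordinates
--
--         # sets the y coordiante to the same as the start y coordinate, if the first line of coordinates is added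
--         if j < (xcoord_count - 1):
--             next_coord[1] = start_coord[1]
--         elif j == (xcoord_count - 1):
--             # sets the y coordiante to one plus the start y coordinate, if the second line of coordinates is added
--             next_coord[1] = start_coord[1] + 1
--             # sets the x coordiante to the same as the start x coordinate when the second line gets started
--             next_coord[0] = start_coord[0]
--         else:
--             # sets the y coordiante to one plus the start y coordinate, if the second line of coordinates is added
--             next_coord[1] = start_coord[1] + 1
--
--         # adds 1 to the x-coordinate, so that the field coord next to the one before can be added
--         next_coord[0] += 1
--     return field_coords  # returns the coordiantes the button is on
-- ===== SOURCE B (Python) =====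
-- def _get_field_coords_end_b(end_button_number):
--     """Same coordinates, computed directly per (row, column) index instead of a cursor loop."""
--     if end_button_number == 0:
--         c, sx, sy = 7, 11, 11
--     elif end_button_number == 1:
--         c, sx, sy = 8, 11, 11
--     elif end_button_number == 2:
--         c, sx, sy = 7, 3, 11
--     else:
--         c, sx, sy = 8, 11, 8
--     return [[sx + i + r, sy + r] for r in (0, 1) for i in range(c)]
-- ===== Notes on version B (the rewrite author's own statement) =====
-- stated objective: simpler
-- what changed: replaced the flat 2*c cursor loop with its j==c-1 boundary branches by a direct comprehension computing each coordinate [sx+i+r, sy+r] from its row/column indices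
import Mathlib
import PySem

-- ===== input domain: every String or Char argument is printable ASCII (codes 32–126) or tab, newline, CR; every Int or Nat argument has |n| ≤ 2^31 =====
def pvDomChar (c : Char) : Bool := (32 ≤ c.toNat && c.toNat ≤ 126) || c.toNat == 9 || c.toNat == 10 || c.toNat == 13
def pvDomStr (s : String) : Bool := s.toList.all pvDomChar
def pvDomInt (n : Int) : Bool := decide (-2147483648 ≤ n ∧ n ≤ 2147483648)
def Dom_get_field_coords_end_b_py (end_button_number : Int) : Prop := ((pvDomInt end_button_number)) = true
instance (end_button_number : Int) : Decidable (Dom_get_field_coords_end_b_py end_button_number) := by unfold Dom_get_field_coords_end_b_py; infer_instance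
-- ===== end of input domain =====

-- B replaces A's flat 2*c cursor loop (with its j==c-1 boundary branches) by a direct
-- per-(row, column) computation [sx + i + r, sy + r]; same values, simpler structure.

-- ===== PORT A =====
-- A's loop: state is (field_coords, next_coord); next_coord's list cells become a pair.
def pvLoopA (c sx sy : Int) : List (List Int) :=
  ((PySem.List.pyRange 0 (2 * c) 1).foldl
    (fun (st : List (List Int) × Int × Int) j =>
      let acc := st.1 ++ [[st.2.1, st.2.2]]
      let nxt :=
        if j < c - 1 then (st.2.1, sy)
        else if j == c - 1 then (sx, sy + 1)
        else (st.2.1, sy + 1)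
      (acc, nxt.1 + 1, nxt.2))
    ([], sx, sy)).1

def get_field_coords_end_b_py (end_button_number : Int) : List (List Int) :=
  if end_button_number == 0 then pvLoopA 7 11 11
  else if end_button_number == 1 then pvLoopA 8 11 11
  else if end_button_number == 2 then pvLoopA 7 3 11
  else pvLoopA 8 11 8

-- ===== PORT B =====
def pvRowsB (c sx sy : Int) : List (List Int) :=
  ([0, 1] : List Int).flatMap
    (fun r => (PySem.List.pyRange 0 c 1).map (fun i => [sx + i + r, sy + r]))

def get_field_coords_end_b_py_alt (end_button_number : Int) : List (List Int) :=
  if end_button_number == 0 then pvRowsB 7 11 11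
  else if end_button_number == 1 then pvRowsB 8 11 11
  else if end_button_number == 2 then pvRowsB 7 3 11
  else pvRowsB 8 11 8

-- ===== PRECONDITION & SPEC =====
def Spec_get_field_coords_end_b_py (end_button_number : Int) (out : List (List Int)) : Prop := out = get_field_coords_end_b_py_alt end_button_number
instance (end_button_number : Int) (out : List (List Int)) : Decidable (Spec_get_field_coords_end_b_py end_button_number out) := by unfold Spec_get_field_coords_end_b_py; infer_instance

-- ===== CLAIM (what is proved, stated in full; the proofs are below) =====
def Claim_equal_get_field_coords_end_b_py : Prop := ∀ (end_button_number : Int), Dom_get_field_coords_end_b_py end_button_number → Spec_get_field_coords_end_b_py end_button_number (get_field_coords_end_b_py end_button_number)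

-- ===== LEMMAS AND PROOFS =====
theorem pvLoop7a : pvLoopA 7 11 11 = pvRowsB 7 11 11 := by decide
theorem pvLoop8a : pvLoopA 8 11 11 = pvRowsB 8 11 11 := by decide
theorem pvLoop7b : pvLoopA 7 3 11 = pvRowsB 7 3 11 := by decide
theorem pvLoop8b : pvLoopA 8 11 8 = pvRowsB 8 11 8 := by decide

-- ===== VERDICT (by name: the statement is the Claim_ definition above) =====
theorem get_field_coords_end_b_py_spec : Claim_equal_get_field_coords_end_b_py := by
  intro n _
  unfold Spec_get_field_coords_end_b_py get_field_coords_end_b_py get_field_coords_end_b_py_alt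
  split_ifs <;> simp [pvLoop7a, pvLoop8a, pvLoop7b, pvLoop8b]
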